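-- pv_equiv track=rewrite | github.com/Orevarc/bbytes_server | ingredient_crf/rasa_training.py | addPrefixes
-- ===== SOURCE A (Python) =====
-- def getPrevTags(data, n):
--     prevTags = []
--     if not n == 0:
--         prevTags = data[n-1][1]
--     return prevTags
--
-- def getNextTags(data, n):
--     nextTags = []
--     if not n == len(data) - 1:
--         nextTags = data[n+1][1]
--     return nextTags
--
-- def addPrefixes(data):
--     '''
--     Returns the tokenized data with corresponding BILOU tags
--     '''
--     newData = []
--     for n, (token, tags) in enumerate(data):
--         prevTags = getPrevTags(data, n)
--         nextTags = getNextTags(data, n)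
--         newTags = []
--         for t in tags:
--             if ((t not in prevTags) and (t not in nextTags)):
--                 p = 'U'
--             elif ((t not in prevTags) and (t in nextTags)):
--                 p = 'B'
--             elif ((t in prevTags) and (t in nextTags)):
--                 p = 'I'
--             else:
--                 p = 'L'
--             newTags.append("%s-%s" % (p, t))
--         newData.append((token, newTags))
--     return newData
-- ===== SOURCE B (Python) =====
-- def bilou(n, positions):
--     before = (n - 1) in positions
--     after = (n + 1) in positions
--     if before:
--         return 'I' if after else 'L'
--     return 'B' if after else 'U'
--
--
-- def addPrefixes(data):
--     '''
--     Returns the tokenized data with corresponding BILOU tags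
--     '''
--     # Inverted index: tag -> set of positions where it occurs.
--     index = {}
--     for n, (_token, tags) in enumerate(data):
--         for t in tags:
--             index.setdefault(t, set()).add(n)
--     # One pass over the data: the prefix of t at position n depends only on
--     # whether n-1 / n+1 are positions of t.
--     return [(token, ["%s-%s" % (bilou(n, index[t]), t) for t in tags])
--             for n, (token, tags) in enumerate(data)]
-- ===== Notes on version B (the rewrite author's own statement) =====
-- stated objective: alternative
-- what changed: Replaces per-position scans of the neighbouring tag lists (getPrevTags/getNextTags plus 'in' on those lists) by a one-pass inverted index tag->set of positions; the BILOU prefix is then decided by membership of n-1 and n+1 in the tag's position set.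
import Mathlib
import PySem

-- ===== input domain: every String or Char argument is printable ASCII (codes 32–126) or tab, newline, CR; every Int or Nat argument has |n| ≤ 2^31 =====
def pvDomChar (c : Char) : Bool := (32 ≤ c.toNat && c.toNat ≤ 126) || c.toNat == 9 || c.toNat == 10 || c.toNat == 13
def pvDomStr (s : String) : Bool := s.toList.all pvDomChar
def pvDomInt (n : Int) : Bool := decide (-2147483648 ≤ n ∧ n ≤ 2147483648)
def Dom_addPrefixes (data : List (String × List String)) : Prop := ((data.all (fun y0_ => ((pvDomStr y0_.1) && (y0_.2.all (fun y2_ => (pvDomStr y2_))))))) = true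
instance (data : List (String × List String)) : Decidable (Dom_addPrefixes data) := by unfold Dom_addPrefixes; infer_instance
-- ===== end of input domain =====

-- B replaces A's per-position neighbour-list scans by an inverted index (tag -> set of
-- positions) built in one pass; the BILOU prefix is then decided by membership of n±1
-- in the tag's position set (objective: alternative decomposition, same results).

-- ===== PORT A =====
-- helper: data[n-1][1] is always in range at the call sites (1 ≤ n < len data),
-- so the total pyGetD form with a dummy default is exact there.
def getPrevTags (data : List (String × List String)) (n : Int) : List String :=
  if ¬ n = 0 then (PySem.List.pyGetD data (n - 1) ("", [])).2 else []

def getNextTags (data : List (String × List String)) (n : Int) : List String :=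
  if ¬ n = (data.length : Int) - 1 then (PySem.List.pyGetD data (n + 1) ("", [])).2 else []

def addPrefixes (data : List (String × List String)) : List (String × List String) :=
  (PySem.List.enumerate data).foldl (fun newData nt =>
    let prevTags := getPrevTags data nt.1
    let nextTags := getNextTags data nt.1
    let newTags := nt.2.2.foldl (fun acc t =>
      let p := if t ∉ prevTags ∧ t ∉ nextTags then "U"
               else if t ∉ prevTags ∧ t ∈ nextTags then "B"
               else if t ∈ prevTags ∧ t ∈ nextTags then "I"
               else "L"
      acc ++ [p ++ "-" ++ t]) ([] : List String)
    newData ++ [(nt.2.1, newTags)]) []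

-- ===== PORT B =====
def bilou (n : Int) (positions : PySem.Set Int) : String :=
  let before := PySem.Set.contains positions (n - 1)
  let after := PySem.Set.contains positions (n + 1)
  if before then (if after then "I" else "L")
  else (if after then "B" else "U")

def buildIndex (data : List (String × List String)) : PySem.Dict String (PySem.Set Int) :=
  (PySem.List.enumerate data).foldl (fun ix nt =>
    nt.2.2.foldl (fun ix t => ix.modify t PySem.Set.empty (fun s => PySem.Set.add s nt.1)) ix)
    PySem.Dict.empty

-- index[t]: the key t is always present at the look-up (it was inserted while indexing
-- this very position), so the total getD form with an empty-set default is exact.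
def addPrefixes_alt (data : List (String × List String)) : List (String × List String) :=
  let index := buildIndex data
  (PySem.List.enumerate data).map (fun nt =>
    (nt.2.1, nt.2.2.map (fun t =>
      bilou nt.1 (index.getD t PySem.Set.empty) ++ "-" ++ t)))

-- ===== PRECONDITION & SPEC =====
def Spec_addPrefixes (data : List (String × List String)) (out : List (String × List String)) : Prop := out = addPrefixes_alt data
instance (data : List (String × List String)) (out : List (String × List String)) : Decidable (Spec_addPrefixes data out) := by unfold Spec_addPrefixes; infer_instance

-- ===== CLAIM (what is proved, stated in full; the proofs are below) =====
def Claim_equal_addPrefixes : Prop := ∀ (data : List (String × List String)), Dom_addPrefixes data → Spec_addPrefixes data (addPrefixes data)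

-- ===== LEMMAS AND PROOFS =====

-- membership in the position set after indexing one position's tag list
theorem mem_tagsFold (tags : List String) (ix : PySem.Dict String (PySem.Set Int))
    (n : Int) (t : String) (k : Int) :
    k ∈ PySem.Dict.getD
        (tags.foldl (fun ix t' => ix.modify t' PySem.Set.empty (fun s => PySem.Set.add s n)) ix)
        t PySem.Set.empty
      ↔ k ∈ PySem.Dict.getD ix t PySem.Set.empty ∨ (t ∈ tags ∧ k = n) := by
  induction tags generalizing ix with
  | nil => simp
  | cons t' rest ih =>
    simp only [List.foldl_cons, ih, PySem.Dict.getD_modify, List.mem_cons]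
    by_cases h : t = t'
    · subst h; simp [PySem.Set.mem_add]; tauto
    · simp [h]

-- membership in the full inverted index, generalized over the start index and accumulator
theorem mem_indexFold (xs : List (String × List String)) (s : Int)
    (d : PySem.Dict String (PySem.Set Int)) (t : String) (k : Int) :
    k ∈ PySem.Dict.getD
        ((PySem.List.enumerate xs s).foldl (fun ix nt =>
          nt.2.2.foldl (fun ix t' => ix.modify t' PySem.Set.empty (fun st => PySem.Set.add st nt.1)) ix) d)
        t PySem.Set.empty
      ↔ k ∈ PySem.Dict.getD d t PySem.Set.empty ∨
          ∃ j : Nat, ∃ _ : j < xs.length, k = s + (j : Int) ∧ t ∈ (xs[j]).2 := by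
  induction xs generalizing s d with
  | nil => simp [PySem.List.enumerate_nil]
  | cons x rest ih =>
    rw [PySem.List.enumerate_cons, List.foldl_cons, ih, mem_tagsFold]
    constructor
    · rintro ((h | ⟨ht, rfl⟩) | ⟨j, hj, rfl, hmem⟩)
      · exact Or.inl h
      · exact Or.inr ⟨0, by simp, by simp, ht⟩
      · exact Or.inr ⟨j + 1, by simpa using hj, by push_cast; ring, by simpa using hmem⟩
    · rintro (h | ⟨j, hj, rfl, hmem⟩)
      · exact Or.inl (Or.inl h)
      · cases j with
        | zero => exact Or.inl (Or.inr ⟨by simpa using hmem, by simp⟩)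
        | succ j =>
          refine Or.inr ⟨j, by simpa using hj, by push_cast; ring, by simpa using hmem⟩

theorem mem_buildIndex (data : List (String × List String)) (t : String) (k : Int) :
    k ∈ PySem.Dict.getD (buildIndex data) t PySem.Set.empty
      ↔ ∃ j : Nat, ∃ _ : j < data.length, k = (j : Int) ∧ t ∈ (data[j]).2 := by
  have := mem_indexFold data 0 PySem.Dict.empty t k
  simpa [buildIndex] using this

-- t is in the previous tag list iff n-1 is a position of t
theorem mem_prev_iff (data : List (String × List String)) (n : Nat) (hn : n < data.length)
    (t : String) :
    t ∈ getPrevTags data (n : Int)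
      ↔ ((n : Int) - 1) ∈ PySem.Dict.getD (buildIndex data) t PySem.Set.empty := by
  rw [mem_buildIndex]
  unfold getPrevTags
  by_cases h0 : n = 0
  · subst h0
    rw [if_neg (by simp)]
    constructor
    · simp
    · rintro ⟨j, hj, hk, _⟩; omega
  · have h1 : 1 ≤ n := Nat.one_le_iff_ne_zero.mpr h0
    have hc : ((n : Int) - 1) = ((n - 1 : Nat) : Int) := by omega
    rw [if_pos (by exact_mod_cast h0), hc, PySem.List.pyGetD_natCast,
        List.getD_eq_getElem _ _ (by omega)]
    constructor
    · intro h; exact ⟨n - 1, by omega, rfl, h⟩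
    · rintro ⟨j, hj, hk, hmem⟩
      have : j = n - 1 := by omega
      subst this; exact hmem

-- t is in the next tag list iff n+1 is a position of t
theorem mem_next_iff (data : List (String × List String)) (n : Nat) (hn : n < data.length)
    (t : String) :
    t ∈ getNextTags data (n : Int)
      ↔ ((n : Int) + 1) ∈ PySem.Dict.getD (buildIndex data) t PySem.Set.empty := by
  rw [mem_buildIndex]
  unfold getNextTags
  by_cases hl : n = data.length - 1
  · have : (n : Int) = (data.length : Int) - 1 := by omega
    rw [if_neg (by simp [this])]
    constructor
    · simp
    · rintro ⟨j, hj, hk, _⟩; omega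
  · have hlt : n + 1 < data.length := by omega
    have hne : ¬ (n : Int) = (data.length : Int) - 1 := by omega
    have hc : ((n : Int) + 1) = ((n + 1 : Nat) : Int) := by push_cast; ring
    rw [if_pos hne, hc, PySem.List.pyGetD_natCast,
        List.getD_eq_getElem _ _ (by omega)]
    constructor
    · intro h; exact ⟨n + 1, hlt, rfl, h⟩
    · rintro ⟨j, hj, hk, hmem⟩
      have : j = n + 1 := by omega
      subst this; exact hmem

-- the four-way prefix chain of A equals B's bilou, per tag
theorem prefix_eq (data : List (String × List String)) (n : Nat) (hn : n < data.length)
    (t : String) :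
    (if t ∉ getPrevTags data (n : Int) ∧ t ∉ getNextTags data (n : Int) then "U"
     else if t ∉ getPrevTags data (n : Int) ∧ t ∈ getNextTags data (n : Int) then "B"
     else if t ∈ getPrevTags data (n : Int) ∧ t ∈ getNextTags data (n : Int) then "I"
     else "L")
      = bilou (n : Int) (PySem.Dict.getD (buildIndex data) t PySem.Set.empty) := by
  have hp := mem_prev_iff data n hn t
  have hq := mem_next_iff data n hn t
  simp only [bilou, PySem.Set.contains_iff, hp, hq]
  split_ifs <;> first | rfl | tauto

-- ===== VERDICT (by name: the statement is the Claim_ definition above) =====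
theorem addPrefixes_spec : Claim_equal_addPrefixes := by
  intro data _
  show addPrefixes data = addPrefixes_alt data
  unfold addPrefixes addPrefixes_alt
  rw [PySem.List.foldl_append_singleton_eq_map]
  refine List.map_congr_left ?_
  intro nt hnt
  obtain ⟨k, hk, rfl⟩ := (PySem.List.mem_enumerate_iff data 0 nt).mp hnt
  simp only [zero_add]
  rw [PySem.List.foldl_append_singleton_eq_map]
  refine congrArg _ (List.map_congr_left ?_)
  intro t _
  rw [prefix_eq data k hk t]
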